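-- pv_equiv track=rewrite | github.com/sairambokka/TIP-102-1a | Bonus/nom_nom.py | nom_nom
-- ===== SOURCE A (Python) =====
-- def nom_nom(values):
--     i = 0
--     while i < len(values) - 1:
--         if values[i] > values[i + 1]:
--             values = values[:i] + [values[i] + values[i + 1]] + values[i + 2:]
--             i = 0
--         else:
--             i += 1
--
--     return values
-- ===== SOURCE B (Python) =====
-- def nom_nom(values):
--     stack = []
--     for x in values:
--         while stack and stack[-1] > x:
--             x += stack.pop()
--         stack.append(x)
--     return stack
-- ===== Notes on version B (the rewrite author's own statement) =====
-- stated objective: faster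
-- what changed: Replaces A's restart-from-index-0 rescan that rebuilds the list by slicing on every merge with a single left-to-right pass using a monotonic stack (push each value, merge-sum while the top exceeds it).
import Mathlib
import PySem

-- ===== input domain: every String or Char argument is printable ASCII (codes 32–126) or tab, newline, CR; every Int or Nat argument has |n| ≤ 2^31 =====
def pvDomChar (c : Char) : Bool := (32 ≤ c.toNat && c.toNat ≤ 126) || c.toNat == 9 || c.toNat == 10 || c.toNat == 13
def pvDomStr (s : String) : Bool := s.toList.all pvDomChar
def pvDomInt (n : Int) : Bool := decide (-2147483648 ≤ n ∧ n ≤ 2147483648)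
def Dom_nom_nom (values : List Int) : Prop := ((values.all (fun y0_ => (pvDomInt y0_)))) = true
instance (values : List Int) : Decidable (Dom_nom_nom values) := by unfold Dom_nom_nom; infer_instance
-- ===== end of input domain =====

-- B replaces A's restart-from-zero rescan (rebuilding the list on every merge) with a single
-- left-to-right pass over a monotonic stack, merging descending tops; objective: faster (asymptotic).

-- ===== PORT A =====
-- used by nomA's termination proof: the merged list is one element shorter
lemma merged_len (values : List Int) (i : Nat) (z : Int) (h : i < values.length - 1) :
  (PySem.List.slice values none (some (i:Int)) ++ [z] ++
   PySem.List.slice values (some ((i:Int)+2)) none).length = values.length - 1 := by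
  have h2 : ((i:Int)+2) = (((i+2:Nat)):Int) := by push_cast; ring
  rw [h2, PySem.List.slice_to_natCast, PySem.List.slice_from_natCast]
  simp; omega

-- A's while-loop: state (values, i); values[i] / values[i+1] are in range (i < len-1),
-- ported as pyGetD; slices values[:i] / values[i+2:] as PySem.List.slice.
def nomA (values : List Int) (i : Nat) : List Int :=
  if h : i < values.length - 1 then
    if PySem.List.pyGetD values (i:Int) 0 > PySem.List.pyGetD values ((i:Int)+1) 0 then
      nomA (PySem.List.slice values none (some (i:Int)) ++
            [PySem.List.pyGetD values (i:Int) 0 + PySem.List.pyGetD values ((i:Int)+1) 0] ++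
            PySem.List.slice values (some ((i:Int)+2)) none) 0
    else nomA values (i+1)
  else values
termination_by (values.length, values.length - i)
decreasing_by
  · apply Prod.Lex.left; rw [merged_len values i _ h]; omega
  · apply Prod.Lex.right; omega

def nom_nom (values : List Int) : List Int := nomA values 0

-- ===== PORT B =====
-- B's inner while-loop: stack kept top-first; `x += stack.pop()` is `x + t`
def push (st : List Int) (x : Int) : List Int :=
  match st with
  | [] => [x]
  | t :: rest => if t > x then push rest (x + t) else x :: t :: rest

-- B's for-loop is the foldl; the final reverse turns the top-first stack back
-- into Python's bottom-first list order
def nom_nom_alt (values : List Int) : List Int :=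
  (values.foldl push []).reverse

-- ===== PRECONDITION & SPEC =====
def Spec_nom_nom (values : List Int) (out : List Int) : Prop := out = nom_nom_alt values
instance (values : List Int) (out : List Int) : Decidable (Spec_nom_nom values out) := by unfold Spec_nom_nom; infer_instance

-- ===== CLAIM (what is proved, stated in full; the proofs are below) =====
def Claim_equal_nom_nom : Prop := ∀ (values : List Int), Dom_nom_nom values → Spec_nom_nom values (nom_nom values)

-- ===== LEMMAS AND PROOFS =====

lemma push_no_merge (s : List Int) (a : Int) (h : ∀ t ∈ s.head?, t ≤ a) :
    push s a = a :: s := by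
  cases s with
  | nil => rfl
  | cons t rest => simp at h; simp [push]; omega

lemma push_push (s : List Int) (a b : Int) (hs : ∀ t ∈ s.head?, t ≤ a) (hab : b < a) :
    push (push s a) b = push s (b + a) := by
  rw [push_no_merge s a hs]; simp [push, hab]

-- on a nondecreasing list the stack never merges: it is just the reversed list
lemma foldl_push_sorted (p : List Int) (h : List.IsChain (· ≤ ·) p) :
    p.foldl push [] = p.reverse := by
  induction p using List.reverseRecOn with
  | nil => rfl
  | append_singleton q x ih =>
    rw [List.isChain_append] at h
    obtain ⟨hq, -, hlast⟩ := h
    rw [List.foldl_append, ih hq]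
    simp only [List.foldl_cons, List.foldl_nil, List.reverse_append, List.reverse_singleton,
      List.singleton_append]
    apply push_no_merge
    intro t ht
    rw [List.head?_reverse] at ht
    exact hlast t ht x (by simp)

lemma chain_take (v : List Int) (k : Nat)
    (H : ∀ j, j + 1 < k → j + 1 < v.length → v.getD j 0 ≤ v.getD (j+1) 0) :
    List.IsChain (· ≤ ·) (v.take k) := by
  rw [List.isChain_iff_getElem]
  intro j hj
  simp only [List.length_take] at hj
  have h1 : j + 1 < v.length := by omega
  simp only [List.getElem_take]
  have := H j (by omega) h1
  rwa [List.getD_eq_getElem v 0 (by omega), List.getD_eq_getElem v 0 h1] at this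

-- invariant of A's loop: the prefix scanned so far is nondecreasing, and under it
-- A's remaining work computes exactly B's stack result
lemma nomA_stack (v : List Int) (i : Nat)
    (H : ∀ j, j + 1 ≤ i → j + 1 < v.length → v.getD j 0 ≤ v.getD (j+1) 0) :
    nomA v i = (v.foldl push []).reverse := by
  induction v, i using nomA.induct with
  | case3 v i h =>
    rw [nomA, dif_neg h]
    have hch : List.IsChain (· ≤ ·) v := by
      have := chain_take v v.length (fun j hj hlen => H j (by omega) hlen)
      simpa using this
    rw [foldl_push_sorted v hch, List.reverse_reverse]
  | case2 v i h hle ih =>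
    rw [nomA, dif_pos h, if_neg hle]
    apply ih
    intro j hj hlen
    rcases Nat.lt_or_ge j i with hji | hji
    · exact H j (by omega) hlen
    · have hj' : j = i := by omega
      subst hj'
      have hcast : ((j:Int)+1) = (((j+1:Nat)):Int) := by push_cast; ring
      rw [hcast, PySem.List.pyGetD_natCast, PySem.List.pyGetD_natCast] at hle
      omega
  | case1 v i h hgt ih =>
    rw [nomA, dif_pos h, if_pos hgt]
    have hcast : ((i:Int)+1) = (((i+1:Nat)):Int) := by push_cast; ring
    have hcast2 : ((i:Int)+2) = (((i+2:Nat)):Int) := by push_cast; ring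
    rw [hcast, PySem.List.pyGetD_natCast, PySem.List.pyGetD_natCast] at hgt
    set a := v.getD i 0 with ha
    set b := v.getD (i+1) 0 with hb
    rw [ih (fun j hj _ => absurd hj (by omega))]
    congr 1
    rw [hcast, hcast2, PySem.List.pyGetD_natCast, PySem.List.pyGetD_natCast,
        PySem.List.slice_to_natCast, PySem.List.slice_from_natCast, ← ha, ← hb]
    have hi1 : i + 1 < v.length := by omega
    have hi : i < v.length := by omega
    have hvdec : v = v.take i ++ a :: b :: v.drop (i+2) := by
      conv_lhs => rw [← List.take_append_drop i v]
      congr 1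
      rw [List.drop_eq_getElem_cons hi, List.drop_eq_getElem_cons hi1]
      rw [ha, hb, List.getD_eq_getElem v 0 hi, List.getD_eq_getElem v 0 hi1]
    have hs : (v.take i).foldl push [] = (v.take i).reverse :=
      foldl_push_sorted _ (chain_take v i (fun j hj hlen => H j (by omega) hlen))
    have hhead : ∀ t ∈ ((v.take i).reverse).head?, t ≤ a := by
      intro t ht
      rw [List.head?_reverse, List.getLast?_eq_getElem?] at ht
      rcases Nat.eq_zero_or_pos i with h0 | h0
      · subst h0; simp at ht
      · have hlen : (v.take i).length = i := by
          rw [List.length_take]; omega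
        rw [hlen] at ht
        have hgi : (v.take i)[i-1]? = some (v[i-1]) := by
          rw [List.getElem?_take]
          simp [Nat.sub_lt h0, List.getElem?_eq_getElem (by omega : i - 1 < v.length)]
        rw [hgi] at ht
        have hle := H (i-1) (by omega) (by omega)
        rw [List.getD_eq_getElem v 0 (by omega : i - 1 < v.length)] at hle
        have heq : i - 1 + 1 = i := by omega
        rw [heq, ← ha] at hle
        simp at ht; omega
    conv_rhs => rw [hvdec]
    rw [List.foldl_append, List.foldl_append, List.foldl_append]
    simp only [List.foldl_cons, List.foldl_nil]
    congr 1
    rw [push_push _ a b (hs ▸ hhead) hgt, Int.add_comm b a]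

-- ===== VERDICT (by name: the statement is the Claim_ definition above) =====
theorem nom_nom_spec : Claim_equal_nom_nom := by
  intro values _
  unfold Spec_nom_nom nom_nom nom_nom_alt
  exact nomA_stack values 0 (fun j hj _ => absurd hj (by omega))
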